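-- pv_equiv track=rewrite | github.com/gaboza12/we-are-algorithm | 724thomas/Week7 DynamicProgramming1/1495.py | solution
-- ===== SOURCE A (Python) =====
-- def solution(n, s, m, arr):
--     prev = set()
--     prev.add(s)
--
--     for num in arr:
--         curr = set()
--         for p in prev:
--             if p + num <= m:
--                 curr.add(p+num)
--             if p - num >= 0:
--                 curr.add(p-num)
--         prev = curr
--     return max(prev) if prev else -1
-- ===== SOURCE B (Python) =====
-- def solution(n, s, m, arr):
--     # Top-down dynamic programming: best(i, v) = maximum final value reachable
--     # from value v at index i (None if every path dies), memoized on (i, v).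
--     memo = {}
--
--     def best(i, v):
--         key = (i, v)
--         if key in memo:
--             return memo[key]
--         if i == len(arr):
--             r = v
--         else:
--             num = arr[i]
--             r = None
--             if v + num <= m:
--                 up = best(i + 1, v + num)
--                 if up is not None and (r is None or up > r):
--                     r = up
--             if v - num >= 0:
--                 down = best(i + 1, v - num)
--                 if down is not None and (r is None or down > r):
--                     r = down
--         memo[key] = r
--         return r
--
--     r = best(0, s)
--     return r if r is not None else -1
-- ===== Notes on version B (the rewrite author's own statement) =====
-- stated objective: alternative
-- what changed: A runs an iterative breadth-first expansion of level sets (a set of reachable values rebuilt for each number, then max at the end); B is top-down dynamic programming: a memoized recursion best(i, v) that returns the maximum reachable final value from state (i, v) directly, combining the two moves with a running best and a (i, v)-keyed memo dict.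
import Mathlib
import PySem

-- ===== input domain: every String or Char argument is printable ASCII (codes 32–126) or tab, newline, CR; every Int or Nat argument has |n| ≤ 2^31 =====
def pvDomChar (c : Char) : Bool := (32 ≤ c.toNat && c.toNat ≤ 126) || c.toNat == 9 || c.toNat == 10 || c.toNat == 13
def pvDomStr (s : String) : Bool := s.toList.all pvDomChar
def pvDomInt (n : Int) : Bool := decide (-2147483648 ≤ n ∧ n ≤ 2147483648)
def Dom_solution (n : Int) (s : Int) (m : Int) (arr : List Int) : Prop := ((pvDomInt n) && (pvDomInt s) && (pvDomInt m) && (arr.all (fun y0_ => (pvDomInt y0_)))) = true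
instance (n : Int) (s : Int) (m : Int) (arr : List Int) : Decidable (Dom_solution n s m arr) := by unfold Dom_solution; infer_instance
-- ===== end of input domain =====

-- B replaces A's iterative level-set BFS by top-down dynamic programming: a memoized recursion best(i,v) computing the maximum reachable final value directly; alternative algorithm, similar cost.


-- ===== PORT A =====
-- A's inner 'for p in prev' loop: builds curr from prev (two guarded set.add's)
def innerA (m num : Int) (prev : PySem.Set Int) : PySem.Set Int :=
  prev.foldl (fun curr p =>
    let curr1 := if p + num ≤ m then PySem.Set.add curr (p + num) else curr
    if p - num ≥ 0 then PySem.Set.add curr1 (p - num) else curr1) PySem.Set.empty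

def solution (n : Int) (s : Int) (m : Int) (arr : List Int) : Int :=
  let prev : PySem.Set Int := PySem.Set.add PySem.Set.empty s
  let final := arr.foldl (fun prev num => innerA m num prev) prev
  match PySem.List.max? final (fun x => x) with
  | some v => v
  | none => -1

-- ===== PORT B =====
-- Source B's conditional update 'if c is not None and (r is None or c > r): r = c'
def relaxB (r c : Option Int) : Option Int :=
  match c with
  | none => r
  | some u => match r with
              | none => some u
              | some rv => if u > rv then some u else r

-- Source B's memoized recursion best(i, v); 'rest' is arr[i:], the memo dict is threaded through
def bestB (m : Int) (rest : List Int) (v : Int) (i : Nat)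
    (memo : PySem.Dict (Int × Int) (Option Int)) :
    Option Int × PySem.Dict (Int × Int) (Option Int) :=
  match memo.get? ((i : Int), v) with
  | some r => (r, memo)
  | none =>
    match rest with
    | [] => (some v, memo.insert ((i : Int), v) (some v))
    | num :: t =>
      let q1 :=
        if v + num ≤ m then
          let p := bestB m t (v + num) (i + 1) memo
          (relaxB none p.1, p.2)
        else (none, memo)
      let q2 :=
        if v - num ≥ 0 then
          let p := bestB m t (v - num) (i + 1) q1.2
          (relaxB q1.1 p.1, p.2)
        else q1
      (q2.1, q2.2.insert ((i : Int), v) q2.1)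
  termination_by rest.length

def solution_alt (n : Int) (s : Int) (m : Int) (arr : List Int) : Int :=
  match (bestB m arr s 0 PySem.Dict.empty).1 with
  | some r => r
  | none => -1

-- ===== PRECONDITION & SPEC =====
def Spec_solution (n : Int) (s : Int) (m : Int) (arr : List Int) (out : Int) : Prop := out = solution_alt n s m arr
instance (n : Int) (s : Int) (m : Int) (arr : List Int) (out : Int) : Decidable (Spec_solution n s m arr out) := by unfold Spec_solution; infer_instance

-- ===== CLAIM =====
def Claim_equal_solution : Prop := ∀ (n : Int) (s : Int) (m : Int) (arr : List Int), Dom_solution n s m arr → Spec_solution n s m arr (solution n s m arr)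

-- ===== LEMMAS AND PROOFS =====

-- memo-free specification of bestB
def pureBest (m : Int) : List Int → Int → Option Int
  | [], v => some v
  | num :: t, v =>
    let r1 := relaxB none (if v + num ≤ m then pureBest m t (v + num) else none)
    relaxB r1 (if v - num ≥ 0 then pureBest m t (v - num) else none)

-- 'x is a final value reachable from v through the moves of arr'
def Reach (m : Int) : List Int → Int → Int → Prop
  | [], v, x => x = v
  | num :: t, v, x => (v + num ≤ m ∧ Reach m t (v + num) x) ∨ (v - num ≥ 0 ∧ Reach m t (v - num) x)

theorem mem_step_one (m num x p : Int) (curr : PySem.Set Int) :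
    x ∈ (let curr1 := if p + num ≤ m then PySem.Set.add curr (p + num) else curr
         if p - num ≥ 0 then PySem.Set.add curr1 (p - num) else curr1)
    ↔ x ∈ curr ∨ (x = p + num ∧ p + num ≤ m) ∨ (x = p - num ∧ p - num ≥ 0) := by
  dsimp only
  split_ifs with h1 h2 h2 <;> simp only [ge_iff_le, Int.sub_nonneg] at h1 h2 ⊢ <;> simp [PySem.Set.mem_add] <;> tauto

theorem mem_innerA_aux (m num x : Int) (l : List Int) (acc : PySem.Set Int) :
    x ∈ l.foldl (fun curr p =>
      let curr1 := if p + num ≤ m then PySem.Set.add curr (p + num) else curr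
      if p - num ≥ 0 then PySem.Set.add curr1 (p - num) else curr1) acc
    ↔ x ∈ acc ∨ ∃ p ∈ l, (x = p + num ∧ p + num ≤ m) ∨ (x = p - num ∧ p - num ≥ 0) := by
  induction l generalizing acc with
  | nil => simp
  | cons p t ih =>
    simp only [List.foldl_cons, ih, mem_step_one, List.exists_mem_cons_iff]
    exact or_assoc

-- A's folded level sets contain exactly the reachable final values
theorem mem_foldA (m : Int) (arr : List Int) :
    ∀ (S : PySem.Set Int) (x : Int),
      x ∈ arr.foldl (fun prev num => innerA m num prev) S ↔ ∃ v ∈ S, Reach m arr v x := by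
  induction arr with
  | nil => intro S x; simp [Reach]
  | cons num t ih =>
    intro S x
    simp only [List.foldl_cons, ih, Reach]
    constructor
    · rintro ⟨p, hp, hr⟩
      rw [show innerA m num S = S.foldl (fun curr p =>
          let curr1 := if p + num ≤ m then PySem.Set.add curr (p + num) else curr
          if p - num ≥ 0 then PySem.Set.add curr1 (p - num) else curr1) PySem.Set.empty from rfl,
        mem_innerA_aux] at hp
      rcases hp with h | ⟨q, hq, ⟨rfl, hle⟩ | ⟨rfl, hle⟩⟩
      · simp [PySem.Set.empty] at h
      · exact ⟨q, hq, Or.inl ⟨hle, hr⟩⟩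
      · exact ⟨q, hq, Or.inr ⟨hle, hr⟩⟩
    · rintro ⟨v, hv, ⟨hle, hr⟩ | ⟨hle, hr⟩⟩ <;>
      · refine ⟨_, ?_, hr⟩
        rw [show innerA m num S = S.foldl (fun curr p =>
            let curr1 := if p + num ≤ m then PySem.Set.add curr (p + num) else curr
            if p - num ≥ 0 then PySem.Set.add curr1 (p - num) else curr1) PySem.Set.empty from rfl,
          mem_innerA_aux]
        exact Or.inr ⟨v, hv, by tauto⟩

theorem pureBest_cons (m num v : Int) (t : List Int) :
    pureBest m (num :: t) v =
      relaxB (relaxB none (if v + num ≤ m then pureBest m t (v + num) else none))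
             (if v - num ≥ 0 then pureBest m t (v - num) else none) := rfl

theorem pureBest_reach (m : Int) (arr : List Int) :
    ∀ (v b : Int), pureBest m arr v = some b → Reach m arr v b := by
  induction arr with
  | nil => intro v b h; simp [pureBest] at h; simp [Reach, h]
  | cons num t ih =>
    intro v b h
    rw [pureBest_cons] at h
    simp only [Reach]
    have hup : ∀ x, (if v + num ≤ m then pureBest m t (v + num) else none) = some x →
        v + num ≤ m ∧ Reach m t (v + num) x := by
      intro x hx; split_ifs at hx with h1
      exact ⟨h1, ih _ _ hx⟩
    have hdn : ∀ x, (if v - num ≥ 0 then pureBest m t (v - num) else none) = some x →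
        v - num ≥ 0 ∧ Reach m t (v - num) x := by
      intro x hx; split_ifs at hx with h1
      exact ⟨h1, ih _ _ hx⟩
    rcases hcu : (if v + num ≤ m then pureBest m t (v + num) else none) with _ | x <;>
      rcases hcd : (if v - num ≥ 0 then pureBest m t (v - num) else none) with _ | y <;>
      rw [hcu, hcd] at h
    · have h' : (none : Option Int) = some b := h
      cases h'
    · have h' : some y = some b := h
      cases h'; exact Or.inr (hdn _ hcd)
    · have h' : some x = some b := h
      cases h'; exact Or.inl (hup _ hcu)
    · have h' : (if y > x then some y else some x) = some b := h
      split_ifs at h' <;> cases h'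
      · exact Or.inr (hdn _ hcd)
      · exact Or.inl (hup _ hcu)

theorem reach_pureBest (m : Int) (arr : List Int) :
    ∀ (v x : Int), Reach m arr v x → ∃ b, pureBest m arr v = some b ∧ x ≤ b := by
  induction arr with
  | nil => intro v x h; simp [Reach] at h; exact ⟨v, rfl, le_of_eq h⟩
  | cons num t ih =>
    intro v x h
    simp only [pureBest]
    set u := (if v + num ≤ m then pureBest m t (v + num) else none) with hu
    set d := (if v - num ≥ 0 then pureBest m t (v - num) else none) with hd
    simp only [Reach] at h
    have key : (∃ bu, u = some bu ∧ x ≤ bu) ∨ (∃ bd, d = some bd ∧ x ≤ bd) := by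
      rcases h with ⟨hle, hr⟩ | ⟨hle, hr⟩
      · obtain ⟨b, hb, hxb⟩ := ih _ _ hr
        exact Or.inl ⟨b, by rw [hu, if_pos hle]; exact hb, hxb⟩
      · obtain ⟨b, hb, hxb⟩ := ih _ _ hr
        exact Or.inr ⟨b, by rw [hd, if_pos hle]; exact hb, hxb⟩
    rcases hcu : u with _ | bu <;> rcases hcd : d with _ | bd <;>
      simp only [hcu, hcd] at key ⊢ <;> simp only [relaxB]
    · rcases key with ⟨_, h, _⟩ | ⟨_, h, _⟩ <;> exact absurd h (by simp)
    · refine ⟨bd, rfl, ?_⟩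
      rcases key with ⟨_, h, _⟩ | ⟨b, h, hx⟩
      · exact absurd h (by simp)
      · cases h; exact hx
    · refine ⟨bu, rfl, ?_⟩
      rcases key with ⟨b, h, hx⟩ | ⟨_, h, _⟩
      · cases h; exact hx
      · exact absurd h (by simp)
    · split_ifs with hlt
      · refine ⟨bd, rfl, ?_⟩
        rcases key with ⟨b, h, hx⟩ | ⟨b, h, hx⟩ <;> cases h
        · exact le_of_lt (lt_of_le_of_lt hx hlt)
        · exact hx
      · refine ⟨bu, rfl, ?_⟩
        rcases key with ⟨b, h, hx⟩ | ⟨b, h, hx⟩ <;> cases h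
        · exact hx
        · exact le_trans hx (le_of_not_gt hlt)

-- the memo only ever holds correct entries
def MemoOK (m : Int) (arr : List Int) (memo : PySem.Dict (Int × Int) (Option Int)) : Prop :=
  ∀ (k : Int × Int) (r : Option Int), memo.get? k = some r →
    ∃ j : Nat, k.1 = (j : Int) ∧ r = pureBest m (arr.drop j) k.2

theorem bestB_correct (m : Int) (arr : List Int) :
    ∀ (rest : List Int) (i : Nat) (v : Int) (memo : PySem.Dict (Int × Int) (Option Int)),
      rest = arr.drop i → MemoOK m arr memo →
      (bestB m rest v i memo).1 = pureBest m rest v ∧ MemoOK m arr (bestB m rest v i memo).2 := by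
  intro rest
  induction rest with
  | nil =>
    intro i v memo hrest hok
    rw [bestB]
    rcases hhit : memo.get? ((i : Int), v) with _ | r
    · refine ⟨rfl, ?_⟩
      intro k r hk
      rw [PySem.Dict.get?_insert] at hk
      split_ifs at hk with hke
      · cases hk; subst hke
        exact ⟨i, rfl, by rw [← hrest]; rfl⟩
      · exact hok k r hk
    · obtain ⟨j, hj, hr⟩ := hok _ _ hhit
      have hj' : (i : Int) = (j : Int) := hj
      have : j = i := by exact_mod_cast hj'.symm
      subst this
      exact ⟨by rw [hr, ← hrest], hok⟩
  | cons num t ih =>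
    intro i v memo hrest hok
    have ht : t = arr.drop (i + 1) := by
      rw [← List.tail_drop, ← hrest]
      rfl
    rw [bestB]
    rcases hhit : memo.get? ((i : Int), v) with _ | r
    · by_cases hp : v + num ≤ m <;> by_cases hq : v - num ≥ 0 <;>
        simp only [hp, hq, ite_true, ite_false]
      · obtain ⟨he1, hm1⟩ := ih (i + 1) (v + num) memo ht hok
        obtain ⟨he2, hm2⟩ := ih (i + 1) (v - num) _ ht hm1
        have hfst : relaxB (relaxB none (bestB m t (v + num) (i + 1) memo).1)
            (bestB m t (v - num) (i + 1) (bestB m t (v + num) (i + 1) memo).2).1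
            = pureBest m (num :: t) v := by
          rw [he2, he1, pureBest_cons, if_pos hp, if_pos hq]
        refine ⟨hfst, ?_⟩
        intro k r hk
        rw [PySem.Dict.get?_insert] at hk
        split_ifs at hk with hke
        · cases hk; subst hke
          exact ⟨i, rfl, by rw [← hrest]; exact hfst⟩
        · exact hm2 k r hk
      · obtain ⟨he1, hm1⟩ := ih (i + 1) (v + num) memo ht hok
        have hfst : relaxB none (bestB m t (v + num) (i + 1) memo).1
            = pureBest m (num :: t) v := by
          rw [he1, pureBest_cons, if_pos hp, if_neg hq]; rfl
        refine ⟨hfst, ?_⟩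
        intro k r hk
        rw [PySem.Dict.get?_insert] at hk
        split_ifs at hk with hke
        · cases hk; subst hke
          exact ⟨i, rfl, by rw [← hrest]; exact hfst⟩
        · exact hm1 k r hk
      · obtain ⟨he2, hm2⟩ := ih (i + 1) (v - num) memo ht hok
        have hfst : relaxB none (bestB m t (v - num) (i + 1) memo).1
            = pureBest m (num :: t) v := by
          rw [he2, pureBest_cons, if_neg hp, if_pos hq]; rfl
        refine ⟨hfst, ?_⟩
        intro k r hk
        rw [PySem.Dict.get?_insert] at hk
        split_ifs at hk with hke
        · cases hk; subst hke
          exact ⟨i, rfl, by rw [← hrest]; exact hfst⟩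
        · exact hm2 k r hk
      · have hfst : (none : Option Int) = pureBest m (num :: t) v := by
          rw [pureBest_cons, if_neg hp, if_neg hq]; rfl
        refine ⟨hfst, ?_⟩
        intro k r hk
        rw [PySem.Dict.get?_insert] at hk
        split_ifs at hk with hke
        · cases hk; subst hke
          exact ⟨i, rfl, by rw [← hrest]; exact hfst⟩
        · exact hok k r hk
    · obtain ⟨j, hj, hr⟩ := hok _ _ hhit
      have hj' : (i : Int) = (j : Int) := hj
      have : j = i := by exact_mod_cast hj'.symm
      subst this
      exact ⟨by rw [hr, ← hrest], hok⟩

theorem solution_eq (n s m : Int) (arr : List Int) : solution n s m arr = solution_alt n s m arr := by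
  have hempty : MemoOK m arr PySem.Dict.empty := by
    intro k r hk; rw [PySem.Dict.get?_empty] at hk; cases hk
  obtain ⟨hB, -⟩ := bestB_correct m arr arr 0 s PySem.Dict.empty rfl hempty
  have hA : solution n s m arr =
      (match PySem.List.max? (arr.foldl (fun prev num => innerA m num prev) [s]) (fun x => x) with
       | some v => v | none => -1) := rfl
  have hB' : solution_alt n s m arr = (match pureBest m arr s with | some r => r | none => -1) := by
    show (match (bestB m arr s 0 PySem.Dict.empty).1 with | some r => r | none => -1) = _
    rw [hB]
  rw [hA, hB']
  have hmem : ∀ x, x ∈ arr.foldl (fun prev num => innerA m num prev) [s] ↔ Reach m arr s x := by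
    intro x
    rw [mem_foldA]
    constructor
    · rintro ⟨v, hv, hr⟩; simp at hv; subst hv; exact hr
    · intro hr; exact ⟨s, by simp, hr⟩
  rcases hc : pureBest m arr s with _ | b
  · -- no reachable final value: A's fold ends empty
    have hnil : arr.foldl (fun prev num => innerA m num prev) [s] = [] := by
      rw [List.eq_nil_iff_forall_not_mem]
      intro x hx
      obtain ⟨b, hb, -⟩ := reach_pureBest m arr s x ((hmem x).mp hx)
      rw [hc] at hb; cases hb
    rw [hnil]
    rfl
  · have hbmem : b ∈ arr.foldl (fun prev num => innerA m num prev) [s] :=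
      (hmem b).mpr (pureBest_reach m arr s b hc)
    have hne : arr.foldl (fun prev num => innerA m num prev) [s] ≠ [] :=
      fun h => by rw [h] at hbmem; cases hbmem
    obtain ⟨w, hw⟩ : ∃ w, PySem.List.max? (arr.foldl (fun prev num => innerA m num prev) [s]) (fun x => x) = some w := by
      rcases h : PySem.List.max? (arr.foldl (fun prev num => innerA m num prev) [s]) (fun x => x) with _ | w
      · exact absurd ((PySem.List.max?_eq_none_iff _ _).mp h) hne
      · exact ⟨w, rfl⟩
    rw [hw]
    have h1 : b ≤ w := PySem.List.max?_isMax hw _ hbmem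
    have h2 : w ≤ b := by
      obtain ⟨b', hb', hwb⟩ := reach_pureBest m arr s w ((hmem w).mp (PySem.List.max?_mem hw))
      rw [hc] at hb'; cases hb'; exact hwb
    simp [le_antisymm h1 h2]

-- ===== VERDICT =====
theorem solution_spec : Claim_equal_solution := by
  intro n s m arr _
  exact solution_eq n s m arr
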